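-- pv_equiv track=rewrite | github.com/jay-snyder/coding-challenges | get_unique_item_count.py | get_unique_item_count
-- ===== SOURCE A (Python) =====
-- def get_unique_item_count(demographics: dict) -> dict:
--     formatted_output = {}
--
--     for demo_name in demographics:
--         formatted_output[demo_name] = len(
--             find_unique_values(
--                 demographics[demo_name], get_all_other_values(demo_name, demographics)
--             )
--         )
--
--     return formatted_output
--
-- def find_unique_values(a: list, b: list) -> list:
--     return list(set(a) - set(b))
--
-- def get_all_other_values(current_key: str, whole_dict: dict) -> list:
--     other_values = []
--
--     for key, value in whole_dict.items():
--         if key is not current_key: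
--             other_values.append(value)
--
--     return sum(other_values, [])
-- ===== SOURCE B (Python) =====
-- def get_unique_item_count(demographics: dict) -> dict:
--     owners = {}
--     for name, values in demographics.items():
--         for v in values:
--             owners.setdefault(v, set()).add(name)
--     return {
--         name: len([v for v in set(values) if owners[v] == {name}])
--         for name, values in demographics.items()
--     }
-- ===== Notes on version B (the rewrite author's own statement) =====
-- stated objective: faster
-- what changed: Instead of rebuilding and rescanning the concatenation of all other keys' value lists for every key, B makes one pass over all (key, values) pairs to build a value->set-of-owning-keys map and then counts, per key, the distinct values whose owner set is exactly that key.
import Mathlib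
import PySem

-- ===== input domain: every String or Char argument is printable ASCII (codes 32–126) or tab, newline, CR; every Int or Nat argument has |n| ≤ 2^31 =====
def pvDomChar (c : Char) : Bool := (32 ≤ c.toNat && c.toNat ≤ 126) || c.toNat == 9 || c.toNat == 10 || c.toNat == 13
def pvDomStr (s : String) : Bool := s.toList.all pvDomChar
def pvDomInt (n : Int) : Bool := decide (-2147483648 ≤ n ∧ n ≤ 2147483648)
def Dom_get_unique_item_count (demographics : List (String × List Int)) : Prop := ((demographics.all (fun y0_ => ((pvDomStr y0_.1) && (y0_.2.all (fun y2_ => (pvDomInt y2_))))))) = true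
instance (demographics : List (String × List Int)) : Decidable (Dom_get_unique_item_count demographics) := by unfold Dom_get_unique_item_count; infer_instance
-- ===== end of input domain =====

-- B replaces A's per-key rescan of all the other keys' lists by ONE pass building a
-- value → set-of-owning-keys map, then counts per key the distinct values owned by that
-- key alone (objective: faster).

-- ===== PORT A =====
-- find_unique_values(a, b) = list(set(a) - set(b)); only its length is used, so set order never matters
def guic_find_unique_values (a b : List Int) : List Int :=
  PySem.Set.diff (PySem.Set.ofList a) (PySem.Set.ofList b)

-- get_all_other_values: append every value-list whose key is not the current one, then sum(.., [])
def guic_get_all_other_values (current_key : String) (whole_dict : List (String × List Int)) : List Int :=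
  (whole_dict.foldl
      (fun other_values kv => if kv.1 != current_key then other_values ++ [kv.2] else other_values)
      ([] : List (List Int))).foldl (· ++ ·) []

def get_unique_item_count (demographics : List (String × List Int)) : List (String × Int) :=
  ((demographics.map Prod.fst).foldl
      (fun formatted_output demo_name =>
        formatted_output.insert demo_name
          (PySem.List.len
            (guic_find_unique_values
              ((PySem.Dict.mk demographics).getD demo_name [])
              (guic_get_all_other_values demo_name demographics))))
      PySem.Dict.empty).items

-- ===== PORT B =====
-- owners: one pass over all (key, values): owners[v] = set of keys whose list contains v
def guic_owners (demographics : List (String × List Int)) : PySem.Dict Int (PySem.Set String) :=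
  demographics.foldl
    (fun owners kv =>
      kv.2.foldl
        (fun owners v => owners.modify v PySem.Set.empty (fun s => PySem.Set.add s kv.1))
        owners)
    PySem.Dict.empty

def get_unique_item_count_alt (demographics : List (String × List Int)) : List (String × Int) :=
  let owners := guic_owners demographics
  demographics.map (fun kv =>
    (kv.1,
     PySem.List.len
       ((PySem.Set.ofList kv.2).filter
         (fun v => PySem.Set.equal (owners.getD v PySem.Set.empty)
                     (PySem.Set.add PySem.Set.empty kv.1)))))

-- ===== PRECONDITION & SPEC =====
-- Pre_ excludes association lists with a repeated key: those never arise from A's Python dict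
-- argument (a dict cannot hold duplicate keys), so no input A returns on is excluded.
def Pre_get_unique_item_count (demographics : List (String × List Int)) : Prop :=
  (demographics.map Prod.fst).Nodup
instance (demographics : List (String × List Int)) : Decidable (Pre_get_unique_item_count demographics) := by unfold Pre_get_unique_item_count; infer_instance

def pvWitness_get_unique_item_count : (List (String × List Int)) :=
  [("adults", [1, 2, 3]), ("kids", [2, 4])]

def Spec_get_unique_item_count (demographics : List (String × List Int)) (out : List (String × Int)) : Prop := out = get_unique_item_count_alt demographics
instance (demographics : List (String × List Int)) (out : List (String × Int)) : Decidable (Spec_get_unique_item_count demographics out) := by unfold Spec_get_unique_item_count; infer_instance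

-- ===== CLAIM (what is proved, stated in full; the proofs are below) =====
def Claim_equal_get_unique_item_count : Prop := ∀ (demographics : List (String × List Int)), Dom_get_unique_item_count demographics → Pre_get_unique_item_count demographics → Spec_get_unique_item_count demographics (get_unique_item_count demographics)

-- ===== LEMMAS AND PROOFS =====

-- membership in the value→owners map after B's inner loop over one key's value list
theorem guic_mem_inner (name : String) (vs : List Int)
    (m : PySem.Dict Int (PySem.Set String)) (v : Int) (k : String) :
    (k ∈ (vs.foldl
        (fun owners v' => owners.modify v' PySem.Set.empty (fun s => PySem.Set.add s name))
        m).getD v PySem.Set.empty) ↔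
      k ∈ m.getD v PySem.Set.empty ∨ (k = name ∧ v ∈ vs) := by
  induction vs generalizing m with
  | nil => simp
  | cons v' vs ih =>
    simp only [List.foldl_cons, ih, PySem.Dict.getD_modify, List.mem_cons]
    by_cases h : v = v'
    · subst h
      simp [PySem.Set.mem_add]
      tauto
    · simp only [if_neg h]
      tauto

-- membership in the value→owners map after B's full double loop
theorem guic_mem_owners (d : List (String × List Int))
    (m : PySem.Dict Int (PySem.Set String)) (v : Int) (k : String) :
    (k ∈ (d.foldl
        (fun owners kv =>
          kv.2.foldl
            (fun owners v' => owners.modify v' PySem.Set.empty (fun s => PySem.Set.add s kv.1))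
            owners)
        m).getD v PySem.Set.empty) ↔
      k ∈ m.getD v PySem.Set.empty ∨ ∃ p ∈ d, p.1 = k ∧ v ∈ p.2 := by
  induction d generalizing m with
  | nil => simp
  | cons kv d ih =>
    simp only [List.foldl_cons, ih, guic_mem_inner, List.mem_cons]
    constructor
    · rintro ((h | ⟨rfl, hv⟩) | ⟨p, hp, rfl, hv⟩)
      · exact Or.inl h
      · exact Or.inr ⟨kv, Or.inl rfl, rfl, hv⟩
      · exact Or.inr ⟨p, Or.inr hp, rfl, hv⟩
    · rintro (h | ⟨p, (rfl | hp), rfl, hv⟩)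
      · exact Or.inl (Or.inl h)
      · exact Or.inl (Or.inr ⟨rfl, hv⟩)
      · exact Or.inr ⟨p, hp, rfl, hv⟩

theorem guic_mem_owners' (d : List (String × List Int)) (v : Int) (k : String) :
    k ∈ (guic_owners d).getD v PySem.Set.empty ↔ ∃ p ∈ d, p.1 = k ∧ v ∈ p.2 := by
  unfold guic_owners
  rw [guic_mem_owners]
  simp [PySem.Dict.getD_empty, PySem.Set.empty]

-- membership in A's concatenation of all the other keys' value lists
theorem guic_mem_others (name : String) (d : List (String × List Int)) (v : Int) :
    v ∈ guic_get_all_other_values name d ↔ ∃ p ∈ d, p.1 ≠ name ∧ v ∈ p.2 := by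
  unfold guic_get_all_other_values
  rw [PySem.List.foldl_append_if, List.nil_append, PySem.List.foldl_append_eq_flatten,
    List.nil_append]
  simp [List.mem_flatten, List.mem_filter]
  tauto

-- per-key agreement: A's |set(vs) - set(others)| is B's count of values owned by this key alone
theorem guic_count_eq (d : List (String × List Int)) (name : String) (vs : List Int)
    (hmem : (name, vs) ∈ d) :
    PySem.List.len (guic_find_unique_values vs (guic_get_all_other_values name d)) =
      PySem.List.len ((PySem.Set.ofList vs).filter
        (fun v => PySem.Set.equal ((guic_owners d).getD v PySem.Set.empty)
                    (PySem.Set.add PySem.Set.empty name))) := by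
  unfold guic_find_unique_values PySem.Set.diff
  congr 1
  apply List.filter_congr
  intro v hv
  have hvvs : v ∈ vs := (PySem.Set.mem_ofList vs v).mp hv
  rw [Bool.eq_iff_iff]
  rw [Bool.not_eq_eq_eq_not, Bool.not_true, ← Bool.not_eq_true,
    PySem.Set.contains_iff, PySem.Set.mem_ofList, guic_mem_others,
    PySem.Set.equal_iff]
  have hsing : ∀ x : String, x ∈ PySem.Set.add PySem.Set.empty name ↔ x = name := by
    intro x
    rw [PySem.Set.mem_add]
    simp [PySem.Set.empty]
  constructor
  · intro hno x
    rw [guic_mem_owners', hsing x]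
    constructor
    · rintro ⟨p, hp, rfl, hvp⟩
      by_contra hne
      exact hno ⟨p, hp, hne, hvp⟩
    · intro hx
      exact ⟨(name, vs), hmem, hx.symm, hvvs⟩
  · rintro hiff ⟨p, hp, hne, hvp⟩
    have := (hiff p.1).mp ((guic_mem_owners' d v p.1).mpr ⟨p, hp, rfl, hvp⟩)
    rw [hsing p.1] at this
    exact hne this

-- ===== VERDICT (by name: the statement is the Claim_ definition above) =====
theorem get_unique_item_count_spec : Claim_equal_get_unique_item_count := by
  intro d _hdom hpre
  unfold Spec_get_unique_item_count get_unique_item_count get_unique_item_count_alt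
  have hkeys : (PySem.Dict.mk d).keys.Nodup := by
    simpa [PySem.Dict.keys] using hpre
  have hitems :
      ((d.map Prod.fst).foldl
          (fun formatted_output demo_name =>
            formatted_output.insert demo_name
              (PySem.List.len
                (guic_find_unique_values
                  ((PySem.Dict.mk d).getD demo_name [])
                  (guic_get_all_other_values demo_name d))))
          PySem.Dict.empty).items =
        (d.map Prod.fst).map (fun n =>
          (n, PySem.List.len
            (guic_find_unique_values
              ((PySem.Dict.mk d).getD n [])
              (guic_get_all_other_values n d)))) := by
    simpa using
      PySem.Dict.items_foldl_insert_fresh (d.map Prod.fst) (fun n => n)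
        (fun n => PySem.List.len
          (guic_find_unique_values
            ((PySem.Dict.mk d).getD n [])
            (guic_get_all_other_values n d)))
        PySem.Dict.empty
        (by intro a _; simp [PySem.Dict.contains_empty])
        (by simpa using hpre)
  rw [hitems, List.map_map]
  apply List.map_congr_left
  intro kv hkv
  have hgetD : (PySem.Dict.mk d).getD kv.1 [] = kv.2 :=
    PySem.Dict.getD_of_mem_items (PySem.Dict.mk d)
      (by simpa using hkv) hkeys []
  simp only [Function.comp_apply, hgetD]
  exact congrArg (fun z => (kv.1, z))
    (guic_count_eq d kv.1 kv.2 (by simpa using hkv))
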